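-- pv_equiv track=rewrite | github.com/RainbowZL0/a001-algo | a004_recursion_reverse_stack/a001.py | pop_bottom
-- ===== SOURCE A (Python) =====
-- def pop_bottom(a: list):
--     if not a:
--         return None
--     record = a.pop()
--     if not a:
--         return record
--     temp = pop_bottom(a=a)
--     a.append(record)
--     return temp
-- ===== SOURCE B (Python) =====
-- def pop_bottom(a: list):
--     if not a:
--         return None
--     return a.pop(0)
-- ===== Notes on version B (the rewrite author's own statement) =====
-- stated objective: simpler
-- what changed: Replaces the recursive pop-all-then-reappend scheme with a guard for the empty list and a single a.pop(0), removing the recursion entirely.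
import Mathlib
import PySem

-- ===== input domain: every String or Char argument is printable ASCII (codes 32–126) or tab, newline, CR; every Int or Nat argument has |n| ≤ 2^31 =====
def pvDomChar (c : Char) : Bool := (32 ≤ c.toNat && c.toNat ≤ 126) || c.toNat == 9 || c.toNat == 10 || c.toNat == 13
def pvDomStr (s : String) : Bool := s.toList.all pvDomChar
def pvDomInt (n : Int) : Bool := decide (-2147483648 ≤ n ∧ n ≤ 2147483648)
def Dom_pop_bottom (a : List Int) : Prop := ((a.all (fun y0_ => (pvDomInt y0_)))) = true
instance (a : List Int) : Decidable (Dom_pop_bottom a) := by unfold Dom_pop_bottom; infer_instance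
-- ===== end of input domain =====

-- B replaces A's recursive pop-all-then-reappend with a direct a.pop(0) (simpler).
-- Both A and B mutate the argument identically (remove the first element, keep the rest in
-- order); the equivalence proved here is about the RETURN value.

-- ===== PORT A =====
-- A pops the last element, recurses on the remainder, then re-appends it; the Lean port
-- models the return value: the mutation of `a` is not observable through the return type.
def pop_bottom (a : List Int) : Option Int :=
  if h : a = [] then none
  else
    let record := a.getLast h          -- record = a.pop()
    let rest := a.dropLast
    if rest = [] then some record
    else
      let temp := pop_bottom rest      -- temp = pop_bottom(a)
      temp                              -- (a.append(record) only mutates; return temp)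
termination_by a.length
decreasing_by
  simp [List.length_dropLast]
  exact List.length_pos_iff.mpr h

-- ===== PORT B =====
def pop_bottom_alt (a : List Int) : Option Int :=
  match a with
  | [] => none            -- if not a: return None
  | x :: _ => some x      -- return a.pop(0)

-- ===== PRECONDITION & SPEC =====
def Spec_pop_bottom (a : List Int) (out : Option Int) : Prop := out = pop_bottom_alt a
instance (a : List Int) (out : Option Int) : Decidable (Spec_pop_bottom a out) := by unfold Spec_pop_bottom; infer_instance

-- ===== CLAIM (what is proved, stated in full; the proofs are below) =====
def Claim_equal_pop_bottom : Prop := ∀ (a : List Int), Dom_pop_bottom a → Spec_pop_bottom a (pop_bottom a)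

-- ===== LEMMAS AND PROOFS =====
theorem pop_bottom_eq_head? (a : List Int) : pop_bottom a = a.head? := by
  induction hn : a.length using Nat.strong_induction_on generalizing a with
  | _ n ih =>
    rw [pop_bottom]
    by_cases h : a = []
    · simp [h]
    · simp only [dif_neg h]
      have hcons := List.dropLast_concat_getLast h
      by_cases hr : a.dropLast = []
      · have : a = [a.getLast h] := by
          conv_lhs => rw [← hcons, hr, List.nil_append]
        rw [if_pos hr]; conv_rhs => rw [this]
        simp
      · rw [if_neg hr]
        have hlt : a.dropLast.length < n := by
          subst hn; simp [List.length_dropLast]; exact List.length_pos_iff.mpr h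
        rw [ih _ hlt _ rfl]
        conv_rhs => rw [← hcons]
        cases he : a.dropLast with
        | nil => exact absurd he hr
        | cons x xs => simp

-- ===== VERDICT (by name: the statement is the Claim_ definition above) =====
theorem pop_bottom_spec : Claim_equal_pop_bottom := by
  intro a _
  unfold Spec_pop_bottom
  rw [pop_bottom_eq_head?]
  cases a <;> simp [pop_bottom_alt]
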